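-- pv_equiv track=rewrite | github.com/shgold/EE451_ImgAnalysis_PatternRecog | Final Project/utils.py | make_dict_from_list
-- ===== SOURCE A (Python) =====
-- from operator import itemgetter
--
-- def sort_dict_by_first_value_tuple(dictionary):
--     '''
--       Sort unordered dictionary of locations of pairs of shapes based on the corresponding digit
--     '''
--     return sorted(dictionary.items(), key = itemgetter(1))
--
-- def make_dict_from_list(dictionary):
--     '''
--     Given location data as a dictionary type, returns two list of ordered dictionary
--
--     ordered_digit : a list of digits on shapes and corresponding holes
--     ordered_locations: a list of ordered locations that we need to visit
--
--     '''
--     ordered = sort_dict_by_first_value_tuple(dictionary)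
--
--     # Sort the detected numbers in an ascending order
--     ordered_digit = sorted([val[1][0] for x,val in enumerate(ordered)]*2)
--
--     # get locations of shape and wholes in common list
--     ordered_loc = list(val[1][1:] for x,val in enumerate(ordered))
--     ordered_point_1loc = [val[0] for val in (ordered_loc)] # locations of shapes
--     ordered_point_2loc = [val[1] for val in (ordered_loc)] # locations of the holes
--
--     # Put the locations of matched pieces and holes that correspond to the numbers
--     ordered_locations = [None]*(len(ordered_digit))
--     for i in range(int(len(ordered_digit)/2)):
--         ordered_locations[2*i] = ordered_point_1loc[i]
--         ordered_locations[2*i+1] = ordered_point_2loc[i]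
--
--     return ordered_digit, ordered_locations
-- ===== SOURCE B (Python) =====
-- from operator import itemgetter
--
-- def make_dict_from_list(dictionary):
--     # one pass over the value-sorted items; the value sort already puts digits
--     # in ascending order, so the separate digit re-sort and the index-based
--     # interleave of two intermediate location lists are not needed
--     ordered_digit = []
--     ordered_locations = []
--     for _key, val in sorted(dictionary.items(), key=itemgetter(1)):
--         ordered_digit += [val[0], val[0]]
--         ordered_locations += [val[1], val[2]]
--     return ordered_digit, ordered_locations
-- ===== Notes on version B (the rewrite author's own statement) =====
-- stated objective: simpler
-- what changed: B keeps the same value-tuple sort but replaces A's redundant re-sort of the doubled digit list, its two location comprehensions and its index-arithmetic interleave loop over a preallocated placeholder list with a single pass over the sorted items that appends each digit twice and the two locations directly.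
import Mathlib
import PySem

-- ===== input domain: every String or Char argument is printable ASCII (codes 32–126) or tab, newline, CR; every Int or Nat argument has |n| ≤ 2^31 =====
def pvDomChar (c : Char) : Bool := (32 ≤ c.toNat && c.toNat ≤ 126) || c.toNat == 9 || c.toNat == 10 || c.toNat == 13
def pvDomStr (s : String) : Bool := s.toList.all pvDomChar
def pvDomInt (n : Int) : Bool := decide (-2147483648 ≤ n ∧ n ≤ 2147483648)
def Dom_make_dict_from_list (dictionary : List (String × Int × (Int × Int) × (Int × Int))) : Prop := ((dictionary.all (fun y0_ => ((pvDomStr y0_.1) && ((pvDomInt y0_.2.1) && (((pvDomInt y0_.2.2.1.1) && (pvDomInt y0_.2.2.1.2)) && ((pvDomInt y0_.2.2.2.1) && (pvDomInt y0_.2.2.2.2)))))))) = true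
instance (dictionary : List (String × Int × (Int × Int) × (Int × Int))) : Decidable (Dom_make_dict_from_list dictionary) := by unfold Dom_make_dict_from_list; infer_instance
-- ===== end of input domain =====

-- B fuses A's digit re-sort (redundant: the value sort already orders digits), the two
-- location comprehensions and the index-arithmetic interleave into one pass over the
-- sorted items (objective: simpler).

-- ===== PORT A =====

-- Python compares the value tuples (digit, (x1, y1), (x2, y2)) lexicographically; on this
-- fixed all-int shape that is exactly the lexicographic order on the flattened 5-element
-- List Int, so the sort key is ported as that flattening (exact on this shape).
def pvValKey (kv : String × Int × (Int × Int) × (Int × Int)) : List Int :=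
  [kv.2.1, kv.2.2.1.1, kv.2.2.1.2, kv.2.2.2.1, kv.2.2.2.2]

def sort_dict_by_first_value_tuple (dictionary : List (String × Int × (Int × Int) × (Int × Int))) :
    List (String × Int × (Int × Int) × (Int × Int)) :=
  @PySem.List.sorted _ (List Int) List.instLinearOrder.toLT LinearOrder.toDecidableLT
    (PySem.Dict.ofList dictionary).items pvValKey false

def make_dict_from_list (dictionary : List (String × Int × (Int × Int) × (Int × Int))) :
    List Int × (List (Int × Int)) :=
  let ordered := sort_dict_by_first_value_tuple dictionary
  -- ordered_digit = sorted([val[1][0] for x,val in enumerate(ordered)]*2)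
  let ordered_digit :=
    PySem.List.sorted ((ordered.map (fun kv => kv.2.1)) ++ (ordered.map (fun kv => kv.2.1)))
      (fun x => x) false
  -- ordered_loc = list(val[1][1:] for ...) ; the tuple slice keeps the two locations
  let ordered_loc := ordered.map (fun kv => (kv.2.2.1, kv.2.2.2))
  let ordered_point_1loc := ordered_loc.map (fun val => val.1)
  let ordered_point_2loc := ordered_loc.map (fun val => val.2)
  -- ordered_locations = [None]*len(ordered_digit), then the fill loop; every slot is
  -- written (the loop covers all indices), so the final .getD default is never used
  let init : List (Option (Int × Int)) := List.replicate ordered_digit.length none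
  let half := PySem.Int.truncdiv (PySem.List.len ordered_digit) 2   -- int(len(...)/2)
  let filled := (PySem.List.pyRange 0 half 1).foldl
    (fun locs i =>
      (locs.set (2 * i).toNat (some (PySem.List.pyGetD ordered_point_1loc i (0, 0)))).set
        (2 * i + 1).toNat (some (PySem.List.pyGetD ordered_point_2loc i (0, 0))))
    init
  (ordered_digit, filled.map (fun o => o.getD (0, 0)))

-- ===== PORT B =====

def make_dict_from_list_alt (dictionary : List (String × Int × (Int × Int) × (Int × Int))) :
    List Int × (List (Int × Int)) :=
  (@PySem.List.sorted _ (List Int) List.instLinearOrder.toLT LinearOrder.toDecidableLT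
      (PySem.Dict.ofList dictionary).items pvValKey false).foldl
    (fun acc kv => (acc.1 ++ [kv.2.1, kv.2.1], acc.2 ++ [kv.2.2.1, kv.2.2.2])) ([], [])

-- ===== PRECONDITION & SPEC =====
def Spec_make_dict_from_list (dictionary : List (String × Int × (Int × Int) × (Int × Int))) (out : List Int × (List (Int × Int))) : Prop := out = make_dict_from_list_alt dictionary
instance (dictionary : List (String × Int × (Int × Int) × (Int × Int))) (out : List Int × (List (Int × Int))) : Decidable (Spec_make_dict_from_list dictionary out) := by unfold Spec_make_dict_from_list; infer_instance

-- ===== CLAIM (what is proved, stated in full; the proofs are below) =====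
def Claim_equal_make_dict_from_list : Prop := ∀ (dictionary : List (String × Int × (Int × Int) × (Int × Int))), Dom_make_dict_from_list dictionary → Spec_make_dict_from_list dictionary (make_dict_from_list dictionary)

-- ===== LEMMAS AND PROOFS =====

-- doubling each element of l is a permutation of l ++ l
theorem pv_flatMap_double_perm {α β : Type} (f : α → β) (l : List α) :
    (l.flatMap (fun x => [f x, f x])).Perm (l.map f ++ l.map f) := by
  induction l with
  | nil => simp
  | cons a t ih =>
    simp only [List.flatMap_cons, List.map_cons, List.cons_append, List.nil_append]
    exact List.Perm.trans (List.Perm.cons _ (List.Perm.cons _ ih))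
      (List.Perm.cons _ List.perm_middle.symm)

-- the first component of the flattened key is monotone in the lex order
theorem pv_key_le_head (a b : String × Int × (Int × Int) × (Int × Int))
    (h : pvValKey a ≤ pvValKey b) : a.2.1 ≤ b.2.1 := by
  by_contra hc
  push Not at hc
  have : pvValKey b < pvValKey a := by
    unfold pvValKey
    exact List.Lex.rel hc
  exact absurd h (not_le.mpr this)

-- doubling preserves pairwise ≤
theorem pv_pairwise_double {α : Type} (d : α → Int) (l : List α)
    (h : l.Pairwise (fun x y => d x ≤ d y)) :
    (l.flatMap (fun x => [d x, d x])).Pairwise (· ≤ ·) := by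
  induction l with
  | nil => simp
  | cons a t ih =>
    rcases List.pairwise_cons.mp h with ⟨ha, ht⟩
    simp only [List.flatMap_cons]
    have hmem : ∀ y ∈ t.flatMap (fun x => [d x, d x]), d a ≤ y := by
      intro y hy
      rcases List.mem_flatMap.mp hy with ⟨x, hx, hyx⟩
      have : y = d x := by simpa using hyx
      exact this ▸ ha x hx
    refine List.pairwise_cons.mpr ⟨?_, List.pairwise_cons.mpr ⟨hmem, ih ht⟩⟩
    intro y hy
    rcases List.mem_cons.mp hy with h1 | h1
    · exact h1 ▸ le_refl _
    · exact hmem y h1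

-- the A-side fill loop, characterised: after the whole loop over range(n) the slots hold
-- the interleave of p1 and p2
theorem pv_fill_loop (p1 p2 : List (Int × Int)) (n : Nat)
    (h1 : p1.length = n) (h2 : p2.length = n)
    (init : List (Option (Int × Int))) (hL : init.length = 2 * n) :
    ∀ k : Nat, k ≤ n →
    (PySem.List.pyRange 0 (k : Int) 1).foldl
      (fun locs i =>
        (locs.set (2 * i).toNat (some (PySem.List.pyGetD p1 i (0, 0)))).set
          (2 * i + 1).toNat (some (PySem.List.pyGetD p2 i (0, 0))))
      init
    = ((p1.take k).zip (p2.take k)).flatMap (fun ab => [some ab.1, some ab.2])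
        ++ init.drop (2 * k) := by
  intro k
  induction k with
  | zero => simp
  | succ k ih =>
    intro hk
    have hk' : k ≤ n := Nat.le_of_succ_le hk
    have hkk : k < n := hk
    have hlen : ((p1.take k).zip (p2.take k)).length = k := by
      simp [List.length_zip, h1, h2, hk']
    have hflen : (((p1.take k).zip (p2.take k)).flatMap (fun ab => [some ab.1, some ab.2])).length = 2 * k := by
      rw [List.length_flatMap]
      simp only [List.length_cons, List.length_nil]
      rw [List.map_const']
      simp [hlen, Nat.mul_comm]
    have h2k : 2 * k < init.length := by omega
    have h2k1 : 2 * k + 1 < init.length := by omega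
    have hk1 : k < p1.length := by omega
    have hk2 : k < p2.length := by omega
    rw [show (((k + 1 : Nat) : Int)) = (k : Int) + 1 by push_cast; ring,
      PySem.List.pyRange_one_succ_right (by positivity), List.foldl_append, ih hk']
    simp only [List.foldl_cons, List.foldl_nil]
    rw [show ((2 * (k : Int)).toNat) = 2 * k by omega,
        show ((2 * (k : Int) + 1).toNat) = 2 * k + 1 by omega,
        PySem.List.pyGetD_natCast, PySem.List.pyGetD_natCast,
        List.getD_eq_getElem p1 _ hk1, List.getD_eq_getElem p2 _ hk2]
    rw [List.set_append, if_neg (by omega)]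
    rw [List.drop_eq_getElem_cons h2k]
    rw [show (2 * k - (((p1.take k).zip (p2.take k)).flatMap (fun ab => [some ab.1, some ab.2])).length) = 0 by omega]
    simp only [List.set_cons_zero]
    rw [List.set_append, if_neg (by omega)]
    rw [show (2 * k + 1 - (((p1.take k).zip (p2.take k)).flatMap (fun ab => [some ab.1, some ab.2])).length) = 1 by omega]
    simp only [List.set_cons_succ]
    rw [List.drop_eq_getElem_cons h2k1, List.set_cons_zero]
    rw [List.take_add_one, List.take_add_one]
    rw [List.getElem?_eq_getElem hk1, List.getElem?_eq_getElem hk2]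
    simp only [Option.toList_some]
    rw [List.zip_append (by simp [h1, h2, hk']), List.flatMap_append]
    rw [show 2 * (k + 1) = 2 * k + 1 + 1 by ring]
    simp

-- the two sides as one closed form over the sorted items
theorem pv_A_eq_flat (dictionary : List (String × Int × (Int × Int) × (Int × Int))) :
    make_dict_from_list dictionary =
      ((sort_dict_by_first_value_tuple dictionary).flatMap (fun kv => [kv.2.1, kv.2.1]),
       (sort_dict_by_first_value_tuple dictionary).flatMap (fun kv => [kv.2.2.1, kv.2.2.2])) := by
  unfold make_dict_from_list
  set ordered := sort_dict_by_first_value_tuple dictionary with hord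
  -- the digit list: the redundant re-sort of the already digit-ascending doubled list
  have hpw : ordered.Pairwise (fun a b => a.2.1 ≤ b.2.1) := by
    have := PySem.List.sorted_pairwise (PySem.Dict.ofList dictionary).items pvValKey
    rw [hord]; unfold sort_dict_by_first_value_tuple
    exact this.imp (fun h => pv_key_le_head _ _ h)
  have hdig : PySem.List.sorted ((ordered.map (fun kv => kv.2.1)) ++ (ordered.map (fun kv => kv.2.1)))
      (fun x => x) false = ordered.flatMap (fun kv => [kv.2.1, kv.2.1]) :=
    PySem.List.sorted_id_eq_of_perm_of_pairwise _ _
      (pv_flatMap_double_perm _ _) (pv_pairwise_double _ _ hpw)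
  simp only [hdig]
  -- the fill loop: lengths
  have hdlen : (ordered.flatMap (fun kv => [kv.2.1, kv.2.1])).length = 2 * ordered.length := by
    rw [List.length_flatMap]
    simp only [List.length_cons, List.length_nil]
    rw [List.map_const']
    simp [Nat.mul_comm]
  have hhalf : PySem.Int.truncdiv (PySem.List.len (ordered.flatMap (fun kv => [kv.2.1, kv.2.1]))) 2
      = ((ordered.length : Nat) : Int) := by
    simp [PySem.Int.truncdiv, PySem.List.len, hdlen]
  rw [hhalf]
  rw [pv_fill_loop (ordered.map (fun kv => (kv.2.2.1, kv.2.2.2)) |>.map (fun v => v.1))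
        (ordered.map (fun kv => (kv.2.2.1, kv.2.2.2)) |>.map (fun v => v.2)) ordered.length
        (by simp) (by simp) _ (by simp [hdlen]) ordered.length le_rfl]
  rw [List.take_of_length_le (by simp), List.take_of_length_le (by simp)]
  rw [List.zip_map']
  rw [List.drop_eq_nil_of_le (by simp [hdlen])]
  rw [List.append_nil]
  simp only [List.map_flatMap, List.flatMap_map]
  simp

theorem pv_B_eq_flat (dictionary : List (String × Int × (Int × Int) × (Int × Int))) :
    make_dict_from_list_alt dictionary =
      ((sort_dict_by_first_value_tuple dictionary).flatMap (fun kv => [kv.2.1, kv.2.1]),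
       (sort_dict_by_first_value_tuple dictionary).flatMap (fun kv => [kv.2.2.1, kv.2.2.2])) := by
  unfold make_dict_from_list_alt
  rw [show (@PySem.List.sorted _ (List Int) List.instLinearOrder.toLT LinearOrder.toDecidableLT
      (PySem.Dict.ofList dictionary).items pvValKey false) = sort_dict_by_first_value_tuple dictionary from rfl]
  rw [PySem.List.foldl_prod_mk (fun s kv => s ++ [kv.2.1, kv.2.1])
        (fun s (kv : String × Int × (Int × Int) × (Int × Int)) => s ++ [kv.2.2.1, kv.2.2.2])]
  rw [PySem.List.foldl_append_eq_flatMap, PySem.List.foldl_append_eq_flatMap]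
  simp

-- ===== VERDICT (by name: the statement is the Claim_ definition above) =====
theorem make_dict_from_list_spec : Claim_equal_make_dict_from_list := by
  intro dictionary _
  unfold Spec_make_dict_from_list
  rw [pv_A_eq_flat, pv_B_eq_flat]
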